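-- pv_equiv track=rewrite | github.com/rickhallett/thepit | archive/phase3-midgets/scripts/slopodar-muster.py | _grade_distribution
-- ===== SOURCE A (Python) =====
-- from typing import Any
--
-- def _grade_distribution(reviews: dict[str, dict[str, Any]]) -> dict[str, int]:
--     """Bucket grades into ranges for the summary."""
--     buckets = {"0-20": 0, "21-40": 0, "41-60": 0, "61-80": 0, "81-100": 0}
--     for r in reviews.values():
--         g = r.get("grade")
--         if g is None:
--             continue
--         if g <= 20:
--             buckets["0-20"] += 1
--         elif g <= 40:
--             buckets["21-40"] += 1
--         elif g <= 60:
--             buckets["41-60"] += 1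
--         elif g <= 80:
--             buckets["61-80"] += 1
--         else:
--             buckets["81-100"] += 1
--     return buckets
-- ===== SOURCE B (Python) =====
-- def _grade_distribution(reviews):
--     """Bucket grades into ranges for the summary."""
--     grades = [g for g in (r.get("grade") for r in reviews.values()) if g is not None]
--     cum = [sum(1 for g in grades if g <= t) for t in (20, 40, 60, 80)] + [len(grades)]
--     keys = ["0-20", "21-40", "41-60", "61-80", "81-100"]
--     return {k: hi - lo for k, lo, hi in zip(keys, [0] + cum, cum)}
-- ===== Notes on version B (the rewrite author's own statement) =====
-- stated objective: alternative
-- what changed: Instead of a per-element if/elif cascade incrementing five counters in one pass, B first collects the grade list, then computes cumulative counts at the four thresholds (count of grades <= t for t in 20,40,60,80) plus the total, and obtains each bucket as the difference of adjacent cumulative counts.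
import Mathlib
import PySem

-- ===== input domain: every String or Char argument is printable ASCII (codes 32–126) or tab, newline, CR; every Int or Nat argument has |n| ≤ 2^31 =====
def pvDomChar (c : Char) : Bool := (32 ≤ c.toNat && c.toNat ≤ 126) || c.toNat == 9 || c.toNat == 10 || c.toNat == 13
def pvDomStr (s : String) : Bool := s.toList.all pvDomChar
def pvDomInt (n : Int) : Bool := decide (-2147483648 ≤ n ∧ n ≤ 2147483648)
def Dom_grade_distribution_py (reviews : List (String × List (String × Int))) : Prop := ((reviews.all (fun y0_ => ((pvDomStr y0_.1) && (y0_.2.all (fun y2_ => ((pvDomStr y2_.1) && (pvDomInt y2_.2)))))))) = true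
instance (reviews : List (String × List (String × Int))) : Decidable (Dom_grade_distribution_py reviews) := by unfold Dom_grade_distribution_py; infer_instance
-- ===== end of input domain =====

-- B replaces A's per-element if/elif cascade over five counters by collecting the
-- grade list, computing cumulative counts at the four thresholds plus the total,
-- and taking adjacent differences (alternative decomposition, same cost).

-- ===== PORT A =====
-- loop body of A, as a helper
def pvBucketA (b : PySem.Dict String Int) (r : String × List (String × Int)) :
    PySem.Dict String Int :=
  match (PySem.Dict.mk r.2).get? "grade" with
  | none => b
  | some g =>
    if g ≤ 20 then b.modify "0-20" 0 (· + 1)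
    else if g ≤ 40 then b.modify "21-40" 0 (· + 1)
    else if g ≤ 60 then b.modify "41-60" 0 (· + 1)
    else if g ≤ 80 then b.modify "61-80" 0 (· + 1)
    else b.modify "81-100" 0 (· + 1)

def grade_distribution_py (reviews : List (String × List (String × Int))) : List (String × Int) :=
  (reviews.foldl pvBucketA
    (PySem.Dict.mk [("0-20", 0), ("21-40", 0), ("41-60", 0), ("61-80", 0), ("81-100", 0)])).items

-- ===== PORT B =====
-- grades = [g for g in (r.get("grade") for r in reviews.values()) if g is not None]
def pvGrades (reviews : List (String × List (String × Int))) : List Int :=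
  reviews.filterMap (fun r => (PySem.Dict.mk r.2).get? "grade")

-- cum = [sum(1 for g in grades if g <= t) for t in (20,40,60,80)] + [len(grades)]
def pvCum (grades : List Int) : List Int :=
  ([20, 40, 60, 80].map (fun t => ((grades.countP (fun g => g ≤ t)) : Int)))
    ++ [(grades.length : Int)]

def grade_distribution_py_alt (reviews : List (String × List (String × Int))) : List (String × Int) :=
  let grades := pvGrades reviews
  let cum := pvCum grades
  let keys := ["0-20", "21-40", "41-60", "61-80", "81-100"]
  (keys.zip ((0 :: cum).zip cum)).map (fun kp => (kp.1, kp.2.2 - kp.2.1))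

-- ===== PRECONDITION & SPEC =====
def Spec_grade_distribution_py (reviews : List (String × List (String × Int))) (out : List (String × Int)) : Prop := out = grade_distribution_py_alt reviews
instance (reviews : List (String × List (String × Int))) (out : List (String × Int)) : Decidable (Spec_grade_distribution_py reviews out) := by unfold Spec_grade_distribution_py; infer_instance

-- ===== CLAIM =====
def Claim_equal_grade_distribution_py : Prop := ∀ (reviews : List (String × List (String × Int))), Dom_grade_distribution_py reviews → Spec_grade_distribution_py reviews (grade_distribution_py reviews)

-- ===== LEMMAS AND PROOFS =====

-- the state of A's dict, as a function of its five counters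
def pvMkD (c0 c1 c2 c3 c4 : Int) : PySem.Dict String Int :=
  PySem.Dict.mk [("0-20", c0), ("21-40", c1), ("41-60", c2), ("61-80", c3), ("81-100", c4)]

-- the five disjoint bucket counts of a grade list
def pvN0 (gs : List Int) : Nat := gs.countP (fun g => decide (g ≤ 20))
def pvN1 (gs : List Int) : Nat := gs.countP (fun g => decide (20 < g) && decide (g ≤ 40))
def pvN2 (gs : List Int) : Nat := gs.countP (fun g => decide (40 < g) && decide (g ≤ 60))
def pvN3 (gs : List Int) : Nat := gs.countP (fun g => decide (60 < g) && decide (g ≤ 80))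
def pvN4 (gs : List Int) : Nat := gs.countP (fun g => decide (80 < g))

-- one step of A's loop on the explicit counter state
lemma pvStepA (r : String × List (String × Int)) (c0 c1 c2 c3 c4 : Int) :
    pvBucketA (pvMkD c0 c1 c2 c3 c4) r =
      match (PySem.Dict.mk r.2).get? "grade" with
      | none => pvMkD c0 c1 c2 c3 c4
      | some g =>
        if g ≤ 20 then pvMkD (c0 + 1) c1 c2 c3 c4
        else if g ≤ 40 then pvMkD c0 (c1 + 1) c2 c3 c4
        else if g ≤ 60 then pvMkD c0 c1 (c2 + 1) c3 c4
        else if g ≤ 80 then pvMkD c0 c1 c2 (c3 + 1) c4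
        else pvMkD c0 c1 c2 c3 (c4 + 1) := by
  unfold pvBucketA
  cases (PySem.Dict.mk r.2).get? "grade" with
  | none => rfl
  | some g =>
    dsimp only
    split_ifs <;>
      simp [pvMkD, PySem.Dict.modify, PySem.Dict.insert, PySem.Dict.getD,
        PySem.Dict.get?, PySem.Dict.contains]

-- the grade list of a cons
lemma pvGrades_cons (r : String × List (String × Int)) (t : List (String × List (String × Int))) :
    pvGrades (r :: t) =
      match (PySem.Dict.mk r.2).get? "grade" with
      | none => pvGrades t
      | some g => g :: pvGrades t := by
  unfold pvGrades; cases h : (PySem.Dict.mk r.2).get? "grade" <;> simp [h]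

-- A's loop, characterised by the bucket counts of the grade list
lemma pvLoopA (reviews : List (String × List (String × Int))) :
    ∀ c0 c1 c2 c3 c4 : Int,
      reviews.foldl pvBucketA (pvMkD c0 c1 c2 c3 c4) =
        pvMkD (c0 + pvN0 (pvGrades reviews)) (c1 + pvN1 (pvGrades reviews))
              (c2 + pvN2 (pvGrades reviews)) (c3 + pvN3 (pvGrades reviews))
              (c4 + pvN4 (pvGrades reviews)) := by
  induction reviews with
  | nil => intro c0 c1 c2 c3 c4; simp [pvGrades, pvN0, pvN1, pvN2, pvN3, pvN4]
  | cons r t ih =>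
    intro c0 c1 c2 c3 c4
    rw [List.foldl_cons, pvStepA, pvGrades_cons]
    cases h : (PySem.Dict.mk r.2).get? "grade" with
    | none => dsimp only; rw [ih]
    | some g =>
      dsimp only
      by_cases h0 : g ≤ 20
      · rw [if_pos h0, ih]
        simp only [pvN0, pvN1, pvN2, pvN3, pvN4, List.countP_cons]
        simp [h0, pvMkD, show ¬ (20:Int) < g by omega]
        omega
      · by_cases h1 : g ≤ 40
        · rw [if_neg h0, if_pos h1, ih]
          simp only [pvN0, pvN1, pvN2, pvN3, pvN4, List.countP_cons]
          simp [h0, h1, pvMkD, show (20:Int) < g by omega, show ¬ (40:Int) < g by omega]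
          omega
        · by_cases h2 : g ≤ 60
          · rw [if_neg h0, if_neg h1, if_pos h2, ih]
            simp only [pvN0, pvN1, pvN2, pvN3, pvN4, List.countP_cons]
            simp [h0, h1, h2, pvMkD, show (40:Int) < g by omega, show ¬ (60:Int) < g by omega]
            omega
          · by_cases h3 : g ≤ 80
            · rw [if_neg h0, if_neg h1, if_neg h2, if_pos h3, ih]
              simp only [pvN0, pvN1, pvN2, pvN3, pvN4, List.countP_cons]
              simp [h0, h1, h2, h3, pvMkD, show (60:Int) < g by omega, show ¬ (80:Int) < g by omega]
              omega
            · rw [if_neg h0, if_neg h1, if_neg h2, if_neg h3, ih]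
              simp only [pvN0, pvN1, pvN2, pvN3, pvN4, List.countP_cons]
              simp [h0, h1, h2, h3, pvMkD, show (80:Int) < g by omega]
              omega

-- a cumulative count splits at a lower threshold into the lower part and the band
lemma pvSplit (gs : List Int) (t1 t2 : Int) (h : t1 ≤ t2) :
    gs.countP (fun g => decide (g ≤ t2)) =
      gs.countP (fun g => decide (g ≤ t1)) +
        gs.countP (fun g => decide (t1 < g) && decide (g ≤ t2)) := by
  induction gs with
  | nil => simp
  | cons g rest ih =>
    simp only [List.countP_cons]
    by_cases h1 : g ≤ t1
    · simp [h1, show g ≤ t2 by omega, show ¬ t1 < g by omega]; omega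
    · by_cases h2 : g ≤ t2
      · simp [h1, h2, show t1 < g by omega]; omega
      · simp [h1, h2, show t1 < g by omega]; omega

-- the total count splits at a threshold
lemma pvTotal (gs : List Int) (t : Int) :
    gs.length = gs.countP (fun g => decide (g ≤ t)) + gs.countP (fun g => decide (t < g)) := by
  induction gs with
  | nil => simp
  | cons g rest ih =>
    simp only [List.countP_cons, List.length_cons]
    by_cases h : g ≤ t
    · simp [h, show ¬ t < g by omega]; omega
    · simp [h, show t < g by omega]; omega

-- B's result, characterised by the same five bucket counts
lemma pvAltEq (reviews : List (String × List (String × Int))) :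
    grade_distribution_py_alt reviews =
      [("0-20", (pvN0 (pvGrades reviews) : Int)), ("21-40", (pvN1 (pvGrades reviews) : Int)),
       ("41-60", (pvN2 (pvGrades reviews) : Int)), ("61-80", (pvN3 (pvGrades reviews) : Int)),
       ("81-100", (pvN4 (pvGrades reviews) : Int))] := by
  set gs := pvGrades reviews with hgs
  have s1 := pvSplit gs 20 40 (by norm_num)
  have s2 := pvSplit gs 40 60 (by norm_num)
  have s3 := pvSplit gs 60 80 (by norm_num)
  have s4 := pvTotal gs 80
  unfold grade_distribution_py_alt pvCum
  rw [← hgs]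
  simp only [List.map_cons, List.map_nil, List.cons_append, List.nil_append,
    List.zip_cons_cons, List.zip_nil_right, List.cons.injEq, Prod.mk.injEq,
    pvN0, pvN1, pvN2, pvN3, pvN4]
  repeat' apply And.intro
  all_goals first | trivial | omega

-- ===== VERDICT =====
theorem grade_distribution_py_spec : Claim_equal_grade_distribution_py := by
  intro reviews _
  unfold Spec_grade_distribution_py grade_distribution_py
  rw [show (PySem.Dict.mk [("0-20", (0:Int)), ("21-40", 0), ("41-60", 0), ("61-80", 0), ("81-100", 0)]) = pvMkD 0 0 0 0 0 from rfl,
    pvLoopA reviews 0 0 0 0 0, pvAltEq]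
  simp [pvMkD]
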